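-- pv_equiv track=rewrite | github.com/Keegan-T/TypeRacer-Stats | src/commands/races/mistakes.py | get_marked_quote
-- ===== SOURCE A (Python) =====
-- def get_marked_quote(quote, markers):
--     characters = []
--     for index, symbol in markers.items():
--         characters.append([index - 0.5, symbol])
--     for i, char in enumerate(quote):
--         characters.append([i, char])
--     characters.sort(key=lambda x: x[0])
--
--     return "".join(x[1] for x in characters)
-- ===== SOURCE B (Python) =====
-- def get_marked_quote(quote, markers):
--     parts = []
--     pos = 0
--     for index, symbol in sorted(markers.items(), key=lambda x: x[0]):
--         c = min(max(index, 0), len(quote))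
--         parts.append(quote[pos:c])
--         parts.append(symbol)
--         pos = c
--     parts.append(quote[pos:])
--     return "".join(parts)
-- ===== Notes on version B (the rewrite author's own statement) =====
-- stated objective: alternative
-- what changed: B sorts only the m markers by index and walks them once with a cursor, emitting the quote chunk before each clamped marker position plus the symbol, instead of A's building a tagged list of all n characters plus m markers and sorting the whole n+m-element list by fractional key.
import Mathlib
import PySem

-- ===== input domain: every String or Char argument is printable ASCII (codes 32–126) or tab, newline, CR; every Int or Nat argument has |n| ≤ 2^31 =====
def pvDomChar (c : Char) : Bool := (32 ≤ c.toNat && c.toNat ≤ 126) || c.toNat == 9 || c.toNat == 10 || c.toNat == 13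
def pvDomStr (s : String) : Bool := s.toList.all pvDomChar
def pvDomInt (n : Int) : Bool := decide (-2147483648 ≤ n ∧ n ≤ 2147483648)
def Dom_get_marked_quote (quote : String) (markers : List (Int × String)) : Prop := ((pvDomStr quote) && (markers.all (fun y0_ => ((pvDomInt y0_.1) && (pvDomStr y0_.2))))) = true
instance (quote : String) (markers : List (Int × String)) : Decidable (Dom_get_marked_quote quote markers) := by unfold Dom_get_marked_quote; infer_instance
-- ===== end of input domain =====

-- B slices the quote into the chunks between the sorted, clamped marker positions instead of
-- tagging every character with a numeric key and sorting all n+m tagged items (objective: alternative).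

-- ===== PORT A =====
-- A's float sort keys index-0.5 (markers) and i (chars) are represented exactly by the doubled
-- integer keys 2*index-1 and 2*i, which induce the identical order.
def get_marked_quote (quote : String) (markers : List (Int × String)) : String :=
  let characters : List (Int × String) :=
    ((PySem.Dict.ofList markers).items).foldl (fun acc p => acc ++ [(2 * p.1 - 1, p.2)]) []
  let characters :=
    (PySem.List.enumerate quote.toList).foldl
      (fun acc p => acc ++ [(2 * p.1, String.ofList [p.2])]) characters
  PySem.Str.join "" ((PySem.List.sorted characters (fun x => x.1) false).map (fun x => x.2))

-- ===== PORT B =====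
def get_marked_quote_alt (quote : String) (markers : List (Int × String)) : String :=
  let cs := quote.toList
  let st :=
    (PySem.List.sorted ((PySem.Dict.ofList markers).items) (fun x => x.1) false).foldl
      (fun (st : List String × Int) p =>
        let c := min (max p.1 0) (cs.length : Int)
        (st.1 ++ [String.ofList (PySem.List.slice cs (some st.2) (some c)), p.2], c))
      ([], 0)
  PySem.Str.join "" (st.1 ++ [String.ofList (PySem.List.slice cs (some st.2) none)])

-- ===== PRECONDITION & SPEC =====
def Spec_get_marked_quote (quote : String) (markers : List (Int × String)) (out : String) : Prop := out = get_marked_quote_alt quote markers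
instance (quote : String) (markers : List (Int × String)) (out : String) : Decidable (Spec_get_marked_quote quote markers out) := by unfold Spec_get_marked_quote; infer_instance

-- ===== CLAIM (what is proved, stated in full; the proofs are below) =====
def Claim_equal_get_marked_quote : Prop := ∀ (quote : String) (markers : List (Int × String)), Dom_get_marked_quote quote markers → Spec_get_marked_quote quote markers (get_marked_quote quote markers)

-- ===== LEMMAS AND PROOFS =====

def pvTagSeg (cs : List Char) (pos c : Nat) : List (Int × String) :=
  (PySem.List.enumerate ((cs.drop pos).take (c - pos)) (pos : Int)).map
    (fun p => (2 * p.1, String.ofList [p.2]))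

lemma pvSegSplit (cs : List Char) {pos c : Nat} (h1 : pos ≤ c) (h2 : c ≤ cs.length) :
    pvTagSeg cs pos cs.length = pvTagSeg cs pos c ++ pvTagSeg cs c cs.length := by
  unfold pvTagSeg
  rw [← List.map_append]
  have hlen : ((cs.drop pos).take (c - pos)).length = c - pos := by
    simp [List.length_take, List.length_drop]; omega
  have hc : (c : Int) = (pos : Int) + (((cs.drop pos).take (c - pos)).length : Int) := by
    rw [hlen]; omega
  rw [hc, ← PySem.List.enumerate_append]
  have e1 : (cs.drop c).take (cs.length - c) = cs.drop c := List.take_of_length_le (by simp)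
  have e2 : (cs.drop pos).take (cs.length - pos) = cs.drop pos := List.take_of_length_le (by simp)
  have e3 : cs.drop c = (cs.drop pos).drop (c - pos) := by rw [List.drop_drop]; congr 1; omega
  rw [e1, e2, e3, List.take_append_drop]

lemma pvMemTagSeg (cs : List Char) (pos c : Nat) {b : Int × String}
    (hb : b ∈ pvTagSeg cs pos c) :
    ∃ j : Nat, pos ≤ j ∧ j < c ∧ j < cs.length ∧ b.1 = 2 * (j : Int) := by
  unfold pvTagSeg at hb
  rcases List.mem_map.mp hb with ⟨q, hq, rfl⟩
  rcases (PySem.List.mem_enumerate_iff _ _ _).mp hq with ⟨k, hk, rfl⟩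
  refine ⟨pos + k, by omega, ?_, ?_, by push_cast; ring⟩ <;>
    simp [List.length_take, List.length_drop] at hk <;> omega

lemma pvPwTagSeg (cs : List Char) (pos c : Nat) :
    List.Pairwise (fun a b : Int × String => a.1 < b.1) (pvTagSeg cs pos c) := by
  unfold pvTagSeg
  rw [List.pairwise_map]
  exact (PySem.List.pairwise_lt_enumerate _ _).imp (fun h => by dsimp; omega)

def pvHP (cs : List Char) (ms : List (Int × String)) (pos : Nat) : Prop :=
  ∀ p ∈ ms, (pos : Int) ≤ min (max p.1 0) (cs.length : Int)

def pvYs (cs : List Char) : List (Int × String) → Nat → List (Int × String)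
  | [], pos => pvTagSeg cs pos cs.length
  | p :: rest, pos =>
      pvTagSeg cs pos ((min (max p.1 0) (cs.length : Int)).toNat)
        ++ (2 * p.1 - 1, p.2) :: pvYs cs rest ((min (max p.1 0) (cs.length : Int)).toNat)

lemma pvHPStep (cs : List Char) (p : Int × String) (rest : List (Int × String))
    (hpw : List.Pairwise (fun a b : Int × String => a.1 < b.1) (p :: rest)) :
    pvHP cs rest ((min (max p.1 0) (cs.length : Int)).toNat) := by
  rcases List.pairwise_cons.mp hpw with ⟨hlt, _⟩
  intro q hq
  have := hlt q hq
  omega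

lemma pvMemYs (cs : List Char) :
    ∀ (ms : List (Int × String)) (pos : Nat),
      List.Pairwise (fun a b : Int × String => a.1 < b.1) ms → pvHP cs ms pos →
      ∀ b ∈ pvYs cs ms pos,
        (∃ p ∈ ms, b.1 = 2 * p.1 - 1) ∨
        (∃ j : Nat, pos ≤ j ∧ j < cs.length ∧ b.1 = 2 * (j : Int)) := by
  intro ms
  induction ms with
  | nil =>
    intro pos _ _ b hb
    rcases pvMemTagSeg cs pos cs.length hb with ⟨j, h1, _, h3, h4⟩
    exact Or.inr ⟨j, h1, h3, h4⟩
  | cons p rest ih =>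
    intro pos hpw hp b hb
    have hpc : (pos : Int) ≤ min (max p.1 0) (cs.length : Int) := hp p (by simp)
    rcases List.mem_append.mp hb with hb | hb
    · rcases pvMemTagSeg cs pos _ hb with ⟨j, h1, _, h3, h4⟩
      exact Or.inr ⟨j, h1, h3, h4⟩
    · rcases List.mem_cons.mp hb with rfl | hb
      · exact Or.inl ⟨p, by simp⟩
      · rcases ih _ (List.pairwise_cons.mp hpw).2 (pvHPStep cs p rest hpw) b hb with h | ⟨j, h1, h2, h3⟩
        · rcases h with ⟨q, hq, he⟩; exact Or.inl ⟨q, by simp [hq], he⟩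
        · exact Or.inr ⟨j, by omega, h2, h3⟩

lemma pvPwYs (cs : List Char) :
    ∀ (ms : List (Int × String)) (pos : Nat),
      List.Pairwise (fun a b : Int × String => a.1 < b.1) ms → pvHP cs ms pos →
      List.Pairwise (fun a b : Int × String => a.1 < b.1) (pvYs cs ms pos) := by
  intro ms
  induction ms with
  | nil => intro pos _ _; exact pvPwTagSeg cs pos cs.length
  | cons p rest ih =>
    intro pos hpw hp
    have hrest := (List.pairwise_cons.mp hpw).2
    have hstep := pvHPStep cs p rest hpw
    show List.Pairwise _ (_ ++ _ :: _)
    rw [List.pairwise_append]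
    refine ⟨pvPwTagSeg cs pos _, ?_, ?_⟩
    · rw [List.pairwise_cons]
      refine ⟨?_, ih _ hrest hstep⟩
      intro b hb
      rcases pvMemYs cs rest _ hrest hstep b hb with ⟨q, hq, he⟩ | ⟨j, h1, h2, h3⟩
      · have := (List.pairwise_cons.mp hpw).1 q hq
        dsimp; omega
      · dsimp; omega
    · intro a ha b hb
      rcases pvMemTagSeg cs pos _ ha with ⟨j, hj1, hj2, hj3, hj4⟩
      have hj2' : (j : Int) < min (max p.1 0) (cs.length : Int) := by omega
      rcases List.mem_cons.mp hb with rfl | hb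
      · dsimp; omega
      · rcases pvMemYs cs rest _ hrest hstep b hb with ⟨q, hq, he⟩ | ⟨j', h1, h2, h3⟩
        · have := (List.pairwise_cons.mp hpw).1 q hq
          omega
        · omega

lemma pvPermYs (cs : List Char) :
    ∀ (ms : List (Int × String)) (pos : Nat),
      List.Pairwise (fun a b : Int × String => a.1 < b.1) ms → pvHP cs ms pos →
      (pvYs cs ms pos).Perm
        (ms.map (fun p => (2 * p.1 - 1, p.2)) ++ pvTagSeg cs pos cs.length) := by
  intro ms
  induction ms with
  | nil => intro pos _ _; simp [pvYs]
  | cons p rest ih =>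
    intro pos hpw hp
    have hrest := (List.pairwise_cons.mp hpw).2
    have hstep := pvHPStep cs p rest hpw
    have hpc : (pos : Int) ≤ min (max p.1 0) (cs.length : Int) := hp p (by simp)
    set c : Nat := (min (max p.1 0) (cs.length : Int)).toNat with hc
    have hsplit := pvSegSplit cs (pos := pos) (c := c) (by omega) (by omega)
    show (pvTagSeg cs pos c ++ (2 * p.1 - 1, p.2) :: pvYs cs rest c).Perm _
    refine List.Perm.trans List.perm_middle ?_
    show ((2 * p.1 - 1, p.2) :: (pvTagSeg cs pos c ++ pvYs cs rest c)).Perm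
      ((2 * p.1 - 1, p.2) :: (rest.map (fun p => (2 * p.1 - 1, p.2)) ++ pvTagSeg cs pos cs.length))
    refine List.Perm.cons _ ?_
    refine List.Perm.trans (List.Perm.append_left _ (ih _ hrest hstep)) ?_
    rw [hsplit, ← List.append_assoc, ← List.append_assoc]
    exact List.Perm.append_right _ List.perm_append_comm

lemma pvJoinNil (l : List (List Char)) : PySem.Chars.join [] l = l.flatten := by
  unfold PySem.Chars.join List.intercalate
  induction l with
  | nil => rfl
  | cons a t ih =>
    cases t with
    | nil => simp
    | cons b t2 => simp_all [List.intersperse]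

lemma pvFlatSingletons (xs : List Char) : (xs.map (fun c => [c])).flatten = xs := by
  induction xs with
  | nil => rfl
  | cons a t ih => simp [ih]

lemma pvFlatTagSeg (cs : List Char) (pos c : Nat) :
    (((pvTagSeg cs pos c).map (fun x => x.2)).map String.toList).flatten
      = (cs.drop pos).take (c - pos) := by
  unfold pvTagSeg
  rw [List.map_map, List.map_map]
  have h1 : (String.toList ∘ (fun x : Int × String => x.2)) ∘
      (fun p : Int × Char => (2 * p.1, String.ofList [p.2]))
      = (fun c : Char => [c]) ∘ (fun p : Int × Char => p.2) := by
    funext p; simp [String.toList_ofList, Function.comp_def]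
  rw [h1, ← List.map_map, PySem.List.map_snd_enumerate, pvFlatSingletons]

lemma pvJoinYs (cs : List Char) :
    ∀ (ms : List (Int × String)) (pos : Nat) (parts : List String),
      List.Pairwise (fun a b : Int × String => a.1 < b.1) ms → pvHP cs ms pos →
      (((ms.foldl
          (fun (st : List String × Int) p =>
            (st.1 ++ [String.ofList (PySem.List.slice cs (some st.2)
                (some (min (max p.1 0) (cs.length : Int)))), p.2],
              min (max p.1 0) (cs.length : Int)))
          (parts, (pos : Int))).1
        ++ [String.ofList (PySem.List.slice cs
            (some (ms.foldl
              (fun (st : List String × Int) p =>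
                (st.1 ++ [String.ofList (PySem.List.slice cs (some st.2)
                    (some (min (max p.1 0) (cs.length : Int)))), p.2],
                  min (max p.1 0) (cs.length : Int)))
              (parts, (pos : Int))).2) none)]).map String.toList).flatten
      = (parts.map String.toList).flatten
        ++ (((pvYs cs ms pos).map (fun x => x.2)).map String.toList).flatten := by
  intro ms
  induction ms with
  | nil =>
    intro pos parts _ _
    show (((parts ++ [String.ofList (PySem.List.slice cs (some (pos : Int)) none)]).map String.toList).flatten) = _
    rw [PySem.List.slice_from_natCast]
    show _ = _ ++ (((pvTagSeg cs pos cs.length).map (fun x => x.2)).map String.toList).flatten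
    rw [pvFlatTagSeg]
    have : (cs.drop pos).take (cs.length - pos) = cs.drop pos := List.take_of_length_le (by simp)
    rw [this]
    simp [String.toList_ofList]
  | cons p rest ih =>
    intro pos parts hpw hp
    have hrest := (List.pairwise_cons.mp hpw).2
    have hstep := pvHPStep cs p rest hpw
    have hpc : (pos : Int) ≤ min (max p.1 0) (cs.length : Int) := hp p (by simp)
    set c : Nat := (min (max p.1 0) (cs.length : Int)).toNat with hc
    have hcI : min (max p.1 0) (cs.length : Int) = (c : Int) := by omega
    rw [List.foldl_cons]
    dsimp only
    rw [hcI, PySem.List.slice_natCast]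
    rw [ih c (parts ++ [String.ofList ((cs.drop pos).take (c - pos)), p.2]) hrest hstep]
    show _ = _ ++ (((pvTagSeg cs pos c ++ (2 * p.1 - 1, p.2) :: pvYs cs rest c).map (fun x => x.2)).map String.toList).flatten
    simp only [List.map_append, List.map_cons, List.flatten_append, List.flatten_cons,
      pvFlatTagSeg, String.toList_ofList, List.append_assoc]
    simp

theorem pvMain : ∀ (quote : String) (markers : List (Int × String)),
    get_marked_quote quote markers = get_marked_quote_alt quote markers := by
  intro quote markers
  set cs := quote.toList with hcs
  set items := (PySem.Dict.ofList markers).items with hitems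
  set ms := PySem.List.sorted items (fun x : Int × String => x.1) false with hms
  -- facts about ms
  have hperm : ms.Perm items := PySem.List.sorted_perm _ _ _
  have hndk : (items.map (fun x : Int × String => x.1)).Nodup := by
    have h := PySem.Dict.nodup_keys_ofList (κ := Int) (ν := String) markers
    simpa [PySem.Dict.keys] using h
  have hndms : (ms.map (fun x : Int × String => x.1)).Nodup :=
    ((hperm.map _).nodup_iff).mpr hndk
  have hpw : List.Pairwise (fun a b : Int × String => a.1 < b.1) ms := by
    have hle := PySem.List.sorted_pairwise items (fun x : Int × String => x.1)
    rw [← hms] at hle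
    have hne : List.Pairwise (fun a b : Int × String => a.1 ≠ b.1) ms :=
      List.pairwise_map.mp hndms
    exact (hle.and hne).imp (fun h => lt_of_le_of_ne h.1 h.2)
  have hp0 : pvHP cs ms 0 := by intro p _; omega
  -- the tagged char list is pvTagSeg cs 0 cs.length
  have hseg0 : pvTagSeg cs 0 cs.length
      = (PySem.List.enumerate cs).map (fun p => (2 * p.1, String.ofList [p.2])) := by
    unfold pvTagSeg
    rw [List.drop_zero, Nat.sub_zero, List.take_length, Nat.cast_zero]
  -- A's sorted list is pvYs cs ms 0
  have hsorted : PySem.List.sorted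
      (([] ++ items.map (fun p => (2 * p.1 - 1, p.2)))
        ++ (PySem.List.enumerate cs).map (fun p => (2 * p.1, String.ofList [p.2])))
      (fun x : Int × String => x.1) false = pvYs cs ms 0 := by
    apply PySem.List.sorted_eq_of_perm_of_pairwise_lt
    · rw [List.nil_append, ← hseg0]
      exact (pvPermYs cs ms 0 hpw hp0).trans
        (List.Perm.append (hperm.map _) (List.Perm.refl _))
    · exact pvPwYs cs ms 0 hpw hp0
  -- assemble
  show get_marked_quote quote markers = get_marked_quote_alt quote markers
  unfold get_marked_quote get_marked_quote_alt
  dsimp only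
  rw [PySem.List.foldl_append_singleton_eq_map, PySem.List.foldl_append_singleton_eq_map]
  simp only [← hcs, ← hitems, ← hms]
  rw [hsorted]
  unfold PySem.Str.join
  congr 1
  have he : ("" : String).toList = [] := rfl
  rw [he, pvJoinNil, pvJoinNil]
  have h := pvJoinYs cs ms 0 [] hpw hp0
  simp only [Nat.cast_zero, List.map_nil, List.flatten_nil, List.nil_append] at h
  exact h.symm

-- ===== VERDICT (by name: the statement is the Claim_ definition above) =====
theorem get_marked_quote_spec : Claim_equal_get_marked_quote := by
  intro quote markers _
  exact pvMain quote markers
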